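-- pv_equiv track=rewrite | github.com/ShajahanAI/codewars | python/6 kyu/45.py | find_super_man
-- ===== SOURCE A (Python) =====
-- def find_super_man(s):
--     string_to_look_for = "superman"
--     for string in [s, s[::-1]]:
--         idx = 0
--         avoid_next_char = False
--         for char in string.lower():
--             if avoid_next_char:
--                 avoid_next_char = False
--                 continue
--
--             if string_to_look_for[idx] == char:
--                 idx += 1
--                 avoid_next_char = True
--                 if char == "n":
--                     return "Hi, SuperMan!"
--
--     return 'Are you crazy?'
-- ===== SOURCE B (Python) =====
-- def find_super_man(s):
--     def gapped(pat, chars):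
--         if not pat:
--             return True
--         for i, c in enumerate(chars):
--             if c == pat[0]:
--                 return gapped(pat[1:], chars[i + 2:])
--         return False
--     if gapped("superman", s.lower()) or gapped("superman", s[::-1].lower()):
--         return "Hi, SuperMan!"
--     return "Are you crazy?"
-- ===== Notes on version B (the rewrite author's own statement) =====
-- stated objective: simpler
-- what changed: Replaces A's one-pass state machine with idx counter and avoid_next_char flag by a short recursion on the pattern: match the first occurrence of the next pattern letter, then continue two characters later.
import Mathlib
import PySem

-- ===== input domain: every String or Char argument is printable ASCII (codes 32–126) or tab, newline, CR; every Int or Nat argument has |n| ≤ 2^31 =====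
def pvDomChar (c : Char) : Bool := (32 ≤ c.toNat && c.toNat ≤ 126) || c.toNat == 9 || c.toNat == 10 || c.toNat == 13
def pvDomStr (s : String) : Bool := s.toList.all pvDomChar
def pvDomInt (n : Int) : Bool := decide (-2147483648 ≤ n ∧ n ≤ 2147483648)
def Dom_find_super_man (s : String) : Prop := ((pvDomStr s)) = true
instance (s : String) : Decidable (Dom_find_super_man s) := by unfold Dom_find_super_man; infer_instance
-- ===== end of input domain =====

-- B replaces A's one-pass skip-flag state machine by a short recursion on the pattern
-- (match the first occurrence, then continue two characters later) — objective: simpler.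

-- ===== PORT A =====
-- the constant string_to_look_for = "superman"
def pvTarget : List Char := "superman".toList

-- inner 'for char in string.lower()' loop of A, with its idx counter and avoid_next_char flag
def pvRunA (chars : List Char) (idx : Nat) (avoid : Bool) : Bool :=
  match chars with
  | [] => false
  | c :: rest =>
    if avoid then pvRunA rest idx false
    else if PySem.List.pyGet? pvTarget (idx : Int) = some c then
      if c = 'n' then true else pvRunA rest (idx + 1) true
    else pvRunA rest idx false

def find_super_man (s : String) : String :=
  -- 'for string in [s, s[::-1]]' with the early return, unrolled into the two iterations
  if pvRunA (PySem.Str.lower s).toList 0 false then "Hi, SuperMan!"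
  else if pvRunA (PySem.Str.lower ((PySem.Str.slice? s none none (-1)).getD "")).toList 0 false
    then "Hi, SuperMan!"
  else "Are you crazy?"

-- ===== PORT B =====
-- gapped(pat, chars): empty pattern matches; otherwise find the first occurrence of
-- pat[0] (the enumerate loop = skipping non-matching chars) and recurse on chars[i+2:]
def pvGapped (pat : List Char) (chars : List Char) : Bool :=
  match pat, chars with
  | [], _ => true
  | _ :: _, [] => false
  | p :: ps, c :: rest => if c = p then pvGapped ps (rest.drop 1) else pvGapped (p :: ps) rest

def find_super_man_alt (s : String) : String :=
  if pvGapped "superman".toList (PySem.Str.lower s).toList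
     || pvGapped "superman".toList
          (PySem.Str.lower ((PySem.Str.slice? s none none (-1)).getD "")).toList
  then "Hi, SuperMan!"
  else "Are you crazy?"

-- ===== PRECONDITION & SPEC =====
def Spec_find_super_man (s : String) (out : String) : Prop := out = find_super_man_alt s
instance (s : String) (out : String) : Decidable (Spec_find_super_man s out) := by unfold Spec_find_super_man; infer_instance

-- ===== CLAIM (what is proved, stated in full; the proofs are below) =====
def Claim_equal_find_super_man : Prop := ∀ (s : String), Dom_find_super_man s → Spec_find_super_man s (find_super_man s)

-- ===== LEMMAS AND PROOFS =====

-- the state machine at state (idx, avoid) decides the same question as pvGapped on the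
-- remaining pattern (avoid = true means the next character is consumed without looking)
lemma runA_eq_gapped (chars : List Char) : ∀ idx : Nat, idx < 8 →
    (pvRunA chars idx false = pvGapped (pvTarget.drop idx) chars) ∧
    (pvRunA chars idx true = pvGapped (pvTarget.drop idx) (chars.drop 1)) := by
  induction chars with
  | nil =>
    intro idx h
    interval_cases idx <;> simp [pvRunA, pvGapped, pvTarget]
  | cons c rest ih =>
    intro idx h
    refine ⟨?_, ?_⟩
    · -- avoid = false: case on which target character is awaited
      interval_cases idx
      · by_cases hc : c = 's' <;>
          simp [pvRunA, pvGapped, pvTarget, PySem.List.pyGet?, PySem.List.pyIdx?, hc,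
                (ih 1 (by omega)).2, (ih 0 (by omega)).1] <;>
          (intro h'; exact absurd h'.symm hc)
      · by_cases hc : c = 'u' <;>
          simp [pvRunA, pvGapped, pvTarget, PySem.List.pyGet?, PySem.List.pyIdx?, hc,
                (ih 2 (by omega)).2, (ih 1 (by omega)).1] <;>
          (intro h'; exact absurd h'.symm hc)
      · by_cases hc : c = 'p' <;>
          simp [pvRunA, pvGapped, pvTarget, PySem.List.pyGet?, PySem.List.pyIdx?, hc,
                (ih 3 (by omega)).2, (ih 2 (by omega)).1] <;>
          (intro h'; exact absurd h'.symm hc)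
      · by_cases hc : c = 'e' <;>
          simp [pvRunA, pvGapped, pvTarget, PySem.List.pyGet?, PySem.List.pyIdx?, hc,
                (ih 4 (by omega)).2, (ih 3 (by omega)).1] <;>
          (intro h'; exact absurd h'.symm hc)
      · by_cases hc : c = 'r' <;>
          simp [pvRunA, pvGapped, pvTarget, PySem.List.pyGet?, PySem.List.pyIdx?, hc,
                (ih 5 (by omega)).2, (ih 4 (by omega)).1] <;>
          (intro h'; exact absurd h'.symm hc)
      · by_cases hc : c = 'm' <;>
          simp [pvRunA, pvGapped, pvTarget, PySem.List.pyGet?, PySem.List.pyIdx?, hc,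
                (ih 6 (by omega)).2, (ih 5 (by omega)).1] <;>
          (intro h'; exact absurd h'.symm hc)
      · by_cases hc : c = 'a' <;>
          simp [pvRunA, pvGapped, pvTarget, PySem.List.pyGet?, PySem.List.pyIdx?, hc,
                (ih 7 (by omega)).2, (ih 6 (by omega)).1] <;>
          (intro h'; exact absurd h'.symm hc)
      · by_cases hc : c = 'n' <;>
          simp [pvRunA, pvGapped, pvTarget, PySem.List.pyGet?, PySem.List.pyIdx?, hc,
                (ih 7 (by omega)).1] <;>
          (intro h'; exact absurd h'.symm hc)
    · -- avoid = true: consume one character, then behave like avoid = false on the rest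
      have := (ih idx h).1
      simp [pvRunA, this]

-- folding A's early-return chain over [s, s[::-1]] into B's single disjunction
lemma if_or_split (b1 b2 : Bool) (x y : String) :
    (if b1 = true then x else if b2 = true then x else y) =
    (if (b1 || b2) = true then x else y) := by
  cases b1 <;> cases b2 <;> simp

-- ===== VERDICT (by name: the statement is the Claim_ definition above) =====
theorem find_super_man_spec : Claim_equal_find_super_man := by
  intro s _
  unfold Spec_find_super_man find_super_man find_super_man_alt
  have h1 := (runA_eq_gapped (PySem.Str.lower s).toList 0 (by omega)).1
  have h2 := (runA_eq_gapped
      (PySem.Str.lower ((PySem.Str.slice? s none none (-1)).getD "")).toList 0 (by omega)).1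
  simp only [List.drop_zero, pvTarget] at h1 h2
  rw [h1, h2, if_or_split]
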